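-- pv_equiv track=rewrite | github.com/akr81/RequirementViewer | src/data_helpers.py | get_next_and_number
-- ===== SOURCE A (Python) =====
-- from typing import Dict, List, Any, Optional
--
-- def get_next_and_number(existing: List[str], candidate: str) -> str:
--     """
--     candidate=="New" → 1〜99 の空き番号を返す。
--     candidate=="" → "None"
--     それ以外はそのまま返す。
--     """
--     if candidate == "New":
--         for i in range(1, 100):
--             s = str(i)
--             if s not in existing:
--                 return s
--         return "None"
--     if not candidate:
--         return "None"
--     return candidate
-- ===== SOURCE B (Python) =====
-- def get_next_and_number(existing, candidate):
--     if candidate == "New":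
--         free = {str(i) for i in range(1, 100)} - set(existing)
--         return min(free, key=int) if free else "None"
--     if not candidate:
--         return "None"
--     return candidate
-- ===== Notes on version B (the rewrite author's own statement) =====
-- stated objective: alternative
-- what changed: Replaces A's ascending scan with early return by materializing the whole free set as a set difference ({'1'..'99'} - set(existing)) and taking its minimum under the int key; no early exit, the selection is an explicit min over the full difference.
import Mathlib
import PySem

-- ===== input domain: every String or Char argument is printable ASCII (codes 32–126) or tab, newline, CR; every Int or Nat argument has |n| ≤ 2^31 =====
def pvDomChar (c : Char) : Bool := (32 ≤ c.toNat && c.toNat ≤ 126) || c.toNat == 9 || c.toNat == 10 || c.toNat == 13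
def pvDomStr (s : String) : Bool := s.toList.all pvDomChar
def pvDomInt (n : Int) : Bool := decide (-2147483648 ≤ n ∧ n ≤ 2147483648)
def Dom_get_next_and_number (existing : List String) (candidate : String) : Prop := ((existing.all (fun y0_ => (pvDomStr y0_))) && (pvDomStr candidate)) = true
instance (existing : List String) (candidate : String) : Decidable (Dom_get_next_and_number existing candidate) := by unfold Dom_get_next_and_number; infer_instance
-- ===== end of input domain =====

-- B replaces A's ascending first-fit scan by an explicit set difference plus a min under the int key (alternative decomposition, same cost class).

-- ===== PORT A =====
-- A's for-loop over range(1,100) with early return, as structural recursion over the range list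
def pvScanA : List Int → List String → String
  | [], _ => "None"
  | i :: rest, existing =>
      let s := PySem.Int.toStr i
      if !(existing.contains s) then s else pvScanA rest existing

def get_next_and_number (existing : List String) (candidate : String) : String :=
  if candidate == "New" then
    pvScanA (PySem.List.pyRange 1 100 1) existing
  else if candidate == "" then "None"
  else candidate

-- ===== PORT B =====
-- {str(i) for i in range(1,100)} - set(existing): the comprehension's elements are pairwise
-- distinct, so the set difference is exactly this filtered list (distinct elements, in order).
def get_next_and_number_alt (existing : List String) (candidate : String) : String :=
  if candidate == "New" then
    let free := ((PySem.List.pyRange 1 100 1).map PySem.Int.toStr).filter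
      (fun s => !(existing.contains s))
    match PySem.List.min? free (fun s => (PySem.Int.ofStr? s).getD 0) with
    | some m => m
    | none => "None"
  else if candidate == "" then "None"
  else candidate

-- ===== PRECONDITION & SPEC =====
def Spec_get_next_and_number (existing : List String) (candidate : String) (out : String) : Prop := out = get_next_and_number_alt existing candidate
instance (existing : List String) (candidate : String) (out : String) : Decidable (Spec_get_next_and_number existing candidate out) := by unfold Spec_get_next_and_number; infer_instance

-- ===== CLAIM (what is proved, stated in full; the proofs are below) =====
def Claim_equal_get_next_and_number : Prop := ∀ (existing : List String) (candidate : String), Dom_get_next_and_number existing candidate → Spec_get_next_and_number existing candidate (get_next_and_number existing candidate)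

-- ===== LEMMAS AND PROOFS =====

-- A's scan returns the head of the filtered list (or "None")
theorem pvScanA_eq_head (l : List Int) (ex : List String) :
    pvScanA l ex =
      (((l.map PySem.Int.toStr).filter (fun s => !(ex.contains s))).head?).getD "None" := by
  induction l with
  | nil => rfl
  | cons i rest ih =>
      by_cases h : PySem.Int.toStr i ∈ ex
      · simp [pvScanA, h, ih]
      · simp [pvScanA, h]

-- a foldl whose step fixes the accumulator never moves off it
theorem pvFoldl_fix {α β : Type} (f : Option β → α → Option β) (m : β) (t : List α)
    (hstep : ∀ x ∈ t, f (some m) x = some m) : t.foldl f (some m) = some m := by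
  induction t with
  | nil => rfl
  | cons y t ih =>
      simp only [List.foldl_cons, hstep y (List.mem_cons_self ..)]
      exact ih (fun x hx => hstep x (List.mem_cons_of_mem _ hx))

-- on a strictly key-increasing list, min? is the head
theorem pvMin?_pairwise {κ : Type} [LinearOrder κ] (key : String → κ) (ys : List String)
    (h : ys.Pairwise (fun a b => key a < key b)) :
    PySem.List.min? ys key = ys.head? := by
  cases ys with
  | nil => rfl
  | cons y t =>
      have ht : ∀ x ∈ t, key y < key x := (List.pairwise_cons.mp h).1
      unfold PySem.List.min?
      simp only [List.foldl_cons, List.head?_cons]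
      show List.foldl _ (some y) t = some y
      apply pvFoldl_fix
      intro x hx
      have hk : ¬ key x < key y := not_lt.mpr (le_of_lt (ht x hx))
      simp [hk]

-- the int key undoes str on the range 1..99
theorem pvKey_toStr : ∀ i ∈ PySem.List.pyRange 1 100 1,
    (PySem.Int.ofStr? (PySem.Int.toStr i)).getD 0 = i := by decide

theorem pvFree_pairwise (ex : List String) :
    (((PySem.List.pyRange 1 100 1).map PySem.Int.toStr).filter
        (fun s => !(ex.contains s))).Pairwise
      (fun a b => (PySem.Int.ofStr? a).getD 0 < (PySem.Int.ofStr? b).getD 0) := by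
  apply List.Pairwise.filter
  rw [List.pairwise_map]
  have hp := PySem.List.pairwise_lt_pyRange_one 1 100
  exact hp.imp_of_mem (fun {a b} ha hb hab => by
    rw [pvKey_toStr a ha, pvKey_toStr b hb]; exact hab)

-- ===== VERDICT (by name: the statement is the Claim_ definition above) =====
theorem get_next_and_number_spec : Claim_equal_get_next_and_number := by
  intro existing candidate _
  unfold Spec_get_next_and_number get_next_and_number get_next_and_number_alt
  by_cases h : candidate == "New"
  · simp only [h, if_true]
    rw [pvScanA_eq_head,
        pvMin?_pairwise (fun s => (PySem.Int.ofStr? s).getD 0) _ (pvFree_pairwise existing)]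
    cases (((PySem.List.pyRange 1 100 1).map PySem.Int.toStr).filter
        (fun s => !(existing.contains s))).head? <;> rfl
  · simp only [h]
    rfl
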